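-- pv_equiv track=rewrite | github.com/jjongs2/leetcode | 1605-find-valid-matrix-given-row-and-column-sums/1605-find-valid-matrix-given-row-and-column-sums.py | restoreMatrix
-- ===== SOURCE A (Python) =====
-- from typing import List
--
-- def restoreMatrix(rowSum: List[int], colSum: List[int]) -> List[List[int]]:
--     matrix = []
--     row_count, col_count = len(rowSum), len(colSum)
--     for r in range(row_count):
--         row = []
--         for c in range(col_count):
--             element = min(rowSum[r], colSum[c])
--             row.append(element)
--             rowSum[r] -= element
--             colSum[c] -= element
--         matrix.append(row)
--     return matrix
-- ===== SOURCE B (Python) =====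
-- def restoreMatrix(rowSum, colSum):
--     # Water-level profile algorithm: u[j] is the cumulative column-capacity profile
--     # (prefix sums of the remaining colSum). Each row raises the level by r and the
--     # row's cells are the clamped increments min(h, u[j+1]) - u[j] of the running max h.
--     # (Unlike A, this does not mutate rowSum/colSum; return-value equivalence.)
--     n = len(colSum)
--     u = [0]
--     for c in colSum:
--         u.append(u[-1] + c)
--     matrix = []
--     for r in rowSum:
--         h = u[0] + r
--         row = []
--         w = []
--         for j in range(n):
--             w.append(h)
--             row.append(min(h, u[j + 1]) - u[j])
--             h = max(h, u[j + 1])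
--         w.append(h)
--         u = w
--         matrix.append(row)
--     return matrix
-- ===== Notes on version B (the rewrite author's own statement) =====
-- stated objective: alternative
-- what changed: Replaces A's per-cell greedy (take min(rowSum[r], colSum[c]) and subtract it from both mutable sum lists) with a water-level profile sweep: B precomputes the prefix-sum profile u of colSum and, per row, sweeps a running max h = u[0]+r over u, emitting cells min(h, u[j+1]) - u[j] and taking the running maxes as the next profile; B does not mutate its arguments (return-value equivalence).
import Mathlib
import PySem

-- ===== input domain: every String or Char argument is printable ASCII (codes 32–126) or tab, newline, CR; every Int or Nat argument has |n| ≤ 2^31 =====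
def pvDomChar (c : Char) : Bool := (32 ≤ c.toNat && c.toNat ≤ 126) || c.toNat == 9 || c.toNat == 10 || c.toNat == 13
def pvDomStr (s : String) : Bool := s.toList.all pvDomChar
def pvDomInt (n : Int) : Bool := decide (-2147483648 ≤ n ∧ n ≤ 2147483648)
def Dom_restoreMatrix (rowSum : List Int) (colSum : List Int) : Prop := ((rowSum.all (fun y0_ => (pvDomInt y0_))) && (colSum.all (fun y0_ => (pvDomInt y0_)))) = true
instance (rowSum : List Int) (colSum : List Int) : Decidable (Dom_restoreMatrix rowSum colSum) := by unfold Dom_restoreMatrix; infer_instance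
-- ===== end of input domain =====

-- B replaces A's per-cell min/subtract greedy with a water-level profile sweep (prefix-sum
-- profile + running max per row); same return value on all inputs. A mutates rowSum/colSum
-- in place, B does not — the equivalence proved here is about the RETURN value only.


-- ===== PORT A =====
-- A's inner loop over columns: state = (row built so far, remaining colSum entries);
-- rowSum[r] -= element is the running remainder `rrem` (index r is touched by no other iteration).
def innerA (rrem : Int) (cs : List Int) : List Int × List Int :=
  match cs with
  | [] => ([], [])
  | c :: rest =>
      let e := min rrem c
      let (row, cs') := innerA (rrem - e) rest
      (e :: row, (c - e) :: cs')

-- A's outer loop over rows, threading the mutated colSum.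
def rowsA (rs : List Int) (cs : List Int) : List (List Int) :=
  match rs with
  | [] => []
  | r :: rest =>
      let (row, cs') := innerA r cs
      row :: rowsA rest cs'

def restoreMatrix (rowSum : List Int) (colSum : List Int) : List (List Int) :=
  rowsA rowSum colSum

-- ===== PORT B =====
-- Source B's profile loop: state = (u, last); append u[-1] + c.
def prefixB (xs : List Int) : List Int :=
  (xs.foldl (fun (st : List Int × Int) x => (st.1 ++ [st.2 + x], st.2 + x)) ([0], 0)).1

-- Source B's inner loop over j: prev = u[j], rest = u[j+1:]; returns (row cells, new profile w).
def rowStep (h : Int) (prev : Int) (rest : List Int) : List Int × List Int :=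
  match rest with
  | [] => ([], [h])
  | unext :: rest' =>
      let (row, w) := rowStep (max h unext) unext rest'
      ((min h unext - prev) :: row, h :: w)

-- Source B's outer loop over rowSum, threading the profile u (always nonempty; [] unreachable).
def rowsB (rs : List Int) (u : List Int) : List (List Int) :=
  match rs with
  | [] => []
  | r :: rest =>
      match u with
      | [] => []
      | u0 :: tail =>
          let (row, w) := rowStep (u0 + r) u0 tail
          row :: rowsB rest w

def restoreMatrix_alt (rowSum : List Int) (colSum : List Int) : List (List Int) :=
  rowsB rowSum (prefixB colSum)

-- ===== PRECONDITION & SPEC =====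
def Spec_restoreMatrix (rowSum : List Int) (colSum : List Int) (out : List (List Int)) : Prop := out = restoreMatrix_alt rowSum colSum
instance (rowSum : List Int) (colSum : List Int) (out : List (List Int)) : Decidable (Spec_restoreMatrix rowSum colSum out) := by unfold Spec_restoreMatrix; infer_instance

-- ===== CLAIM (what is proved, stated in full; the proofs are below) =====
def Claim_equal_restoreMatrix : Prop := ∀ (rowSum : List Int) (colSum : List Int), Dom_restoreMatrix rowSum colSum → Spec_restoreMatrix rowSum colSum (restoreMatrix rowSum colSum)

-- ===== LEMMAS AND PROOFS =====

-- proof-only helpers: prefix list and consecutive differences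
def pfx (xs : List Int) (s : Int) : List Int :=
  match xs with
  | [] => [s]
  | x :: t => s :: pfx t (s + x)

def diffs : List Int → List Int
  | [] => []
  | [_] => []
  | a :: b :: rest => (b - a) :: diffs (b :: rest)

theorem foldlB (xs : List Int) : ∀ (acc : List Int) (s : Int),
    (xs.foldl (fun (st : List Int × Int) x => (st.1 ++ [st.2 + x], st.2 + x)) (acc ++ [s], s)).1
      = acc ++ pfx xs s := by
  induction xs with
  | nil => intro acc s; simp [pfx]
  | cons x t ih =>
    intro acc s
    simp only [List.foldl_cons, pfx]
    have := ih (acc ++ [s]) (s + x)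
    simpa [List.append_assoc] using this

theorem prefixB_pfx (xs : List Int) : prefixB xs = pfx xs 0 := by
  have := foldlB xs [] 0
  simpa [prefixB] using this

theorem diffs_pfx (xs : List Int) : ∀ s : Int, diffs (pfx xs s) = xs := by
  induction xs with
  | nil => intro s; simp [pfx, diffs]
  | cons x t ih =>
    intro s
    cases t with
    | nil => simp [pfx, diffs]
    | cons y u =>
      have := ih (s + x)
      simp only [pfx] at this ⊢
      simp only [diffs, this]
      congr 1
      ring

theorem rowStep_snd_ne_nil (rest : List Int) (h prev : Int) :
    (rowStep h prev rest).2 ≠ [] := by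
  cases rest <;> simp [rowStep]

-- one row of A's greedy on the difference list equals one profile sweep of B
theorem step_eq (tail : List Int) : ∀ u0 h : Int,
    innerA (h - u0) (diffs (u0 :: tail)) =
      ((rowStep h u0 tail).1, diffs ((rowStep h u0 tail).2)) := by
  induction tail with
  | nil => intro u0 h; simp [diffs, innerA, rowStep]
  | cons unext rest ih =>
    intro u0 h
    simp only [diffs, innerA, rowStep]
    have e1 : min (h - u0) (unext - u0) = min h unext - u0 := by omega
    have e2 : h - u0 - (min h unext - u0) = max h unext - unext := by omega
    rw [e1, e2, ih unext (max h unext)]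
    obtain ⟨w, hw⟩ : ∃ w, (rowStep (max h unext) unext rest).2 = (max h unext) :: w := by
      cases rest <;> exact ⟨_, rfl⟩
    rw [hw]
    simp only [diffs]
    congr 2
    omega

-- A's whole loop on the difference list equals B's whole loop on the profile
theorem rows_eq (rs : List Int) : ∀ u : List Int, u ≠ [] →
    rowsA rs (diffs u) = rowsB rs u := by
  induction rs with
  | nil => intro u _; simp [rowsA, rowsB]
  | cons r rest ih =>
    intro u hu
    cases u with
    | nil => exact absurd rfl hu
    | cons u0 tail =>
      simp only [rowsA, rowsB]
      have h := step_eq tail u0 (u0 + r)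
      have e : u0 + r - u0 = r := by ring
      rw [e] at h
      rw [h]
      exact congrArg _ (ih _ (rowStep_snd_ne_nil tail (u0 + r) u0))

theorem pfx_ne_nil (xs : List Int) (s : Int) : pfx xs s ≠ [] := by
  cases xs <;> simp [pfx]

-- ===== VERDICT (by name: the statement is the Claim_ definition above) =====
theorem restoreMatrix_spec : Claim_equal_restoreMatrix := by
  intro rs cs _hdom
  unfold Spec_restoreMatrix restoreMatrix restoreMatrix_alt
  rw [prefixB_pfx]
  have := rows_eq rs (pfx cs 0) (pfx_ne_nil cs 0)
  rw [diffs_pfx cs 0] at this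
  exact this
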